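-- pv_equiv track=rewrite | github.com/quamis/qa | v3/Solver/Base.py | print_tbuf
-- ===== SOURCE A (Python) =====
-- def print_tbuf(tbuf):
--     s = "tbuf:"
--     sum = 0
--     altsum = 0;
--     xor = 0;
--     for i in range(0, len(tbuf)):
--         s+= "%02x" % (tbuf[i])
--
--         if i % 2==0:
--             altsum+= tbuf[i]
--         else:
--             altsum-= tbuf[i]
--
--         sum+=tbuf[i]
--
--         xor^= tbuf[i]
--
--     s+= "    (%02x, %02x, %02x)" % (sum, altsum, xor)
--     return s
-- ===== SOURCE B (Python) =====
-- def print_tbuf(tbuf):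
--     hexpart = "".join("%02x" % b for b in tbuf)
--     total = sum(tbuf)
--     altsum = 0
--     for b in reversed(tbuf):
--         altsum = b - altsum
--     x = 0
--     for b in tbuf:
--         x ^= b
--     return "tbuf:" + hexpart + "    (%02x, %02x, %02x)" % (total, altsum, x)
-- ===== Notes on version B (the rewrite author's own statement) =====
-- stated objective: simpler
-- what changed: The single fused indexed loop carrying four accumulators is split into four independent passes: a join of per-byte hex strings, the builtin sum, a reversed-order fold computing the alternating sum without tracking index parity, and a plain xor loop.
import Mathlib
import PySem

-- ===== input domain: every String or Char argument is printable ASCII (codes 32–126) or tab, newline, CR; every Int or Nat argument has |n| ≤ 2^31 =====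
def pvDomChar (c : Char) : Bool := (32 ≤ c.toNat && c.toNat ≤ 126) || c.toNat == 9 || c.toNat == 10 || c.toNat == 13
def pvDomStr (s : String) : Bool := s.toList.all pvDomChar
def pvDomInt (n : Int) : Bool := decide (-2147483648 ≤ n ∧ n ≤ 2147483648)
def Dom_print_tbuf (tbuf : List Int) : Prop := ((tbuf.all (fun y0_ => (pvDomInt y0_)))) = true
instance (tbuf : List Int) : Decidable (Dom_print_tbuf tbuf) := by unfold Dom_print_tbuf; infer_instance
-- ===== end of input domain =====

-- B splits A's fused four-accumulator loop into four independent passes (join / sum / reversed fold / xor loop); same output, no speed claim.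

-- shared formatting helper: Python's "%02x" % n (lowercase hex, zero-padded to width 2, '-' sign for negatives)
def hex02 (n : Int) : String :=
  if n < 0 then "-" ++ String.ofList (Nat.toDigits 16 (-n).toNat)
  else if n < 16 then "0" ++ String.ofList (Nat.toDigits 16 n.toNat)
  else String.ofList (Nat.toDigits 16 n.toNat)

-- ===== PORT A =====
-- the for-loop over range(len(tbuf)): i is the running index, state (s, sum, altsum, xor)
def print_tbuf_loop (l : List Int) (i : Nat) (s : String) (sum altsum xor : Int) :
    String × Int × Int × Int :=
  match l with
  | [] => (s, sum, altsum, xor)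
  | x :: rest =>
      print_tbuf_loop rest (i + 1) (s ++ hex02 x)
        (sum + x)
        (if i % 2 == 0 then altsum + x else altsum - x)
        (PySem.Int.bxor xor x)

def print_tbuf (tbuf : List Int) : String :=
  let st := print_tbuf_loop tbuf 0 "tbuf:" 0 0 0
  st.1 ++ "    (" ++ hex02 st.2.1 ++ ", " ++ hex02 st.2.2.1 ++ ", " ++ hex02 st.2.2.2 ++ ")"

-- ===== PORT B =====
def print_tbuf_alt (tbuf : List Int) : String :=
  let hexpart := String.join (tbuf.map hex02)
  let total := tbuf.sum
  let altsum := tbuf.reverse.foldl (fun acc b => b - acc) 0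
  let x := tbuf.foldl PySem.Int.bxor 0
  "tbuf:" ++ hexpart ++ "    (" ++ hex02 total ++ ", " ++ hex02 altsum ++ ", " ++ hex02 x ++ ")"

-- ===== PRECONDITION & SPEC =====
def Spec_print_tbuf (tbuf : List Int) (out : String) : Prop := out = print_tbuf_alt tbuf
instance (tbuf : List Int) (out : String) : Decidable (Spec_print_tbuf tbuf out) := by unfold Spec_print_tbuf; infer_instance

-- ===== CLAIM (what is proved, stated in full; the proofs are below) =====
def Claim_equal_print_tbuf : Prop := ∀ (tbuf : List Int), Dom_print_tbuf tbuf → Spec_print_tbuf tbuf (print_tbuf tbuf)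

-- ===== LEMMAS AND PROOFS =====

theorem revfoldl_cons (x : Int) (l : List Int) :
    (x :: l).reverse.foldl (fun acc b => b - acc) 0
      = x - l.reverse.foldl (fun acc b => b - acc) 0 := by
  simp [List.foldl_reverse]

theorem foldl_append_str (l : List String) :
    ∀ a, List.foldl (fun r s => r ++ s) a l = a ++ List.foldl (fun r s => r ++ s) "" l := by
  induction l with
  | nil => simp
  | cons b t ih =>
      intro a
      simp only [List.foldl]
      rw [ih (a ++ b), ih ("" ++ b)]
      simp [String.append_assoc]

theorem print_tbuf_loop_eq (l : List Int) : ∀ (i : Nat) (s : String) (su al xo : Int),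
    print_tbuf_loop l i s su al xo =
      (s ++ String.join (l.map hex02),
       su + l.sum,
       (if i % 2 == 0 then al + l.reverse.foldl (fun acc b => b - acc) 0
        else al - l.reverse.foldl (fun acc b => b - acc) 0),
       l.foldl PySem.Int.bxor xo) := by
  induction l with
  | nil => intro i s su al xo; simp [print_tbuf_loop, String.join]
  | cons x rest ih =>
      intro i s su al xo
      rw [print_tbuf_loop, ih, revfoldl_cons]
      rcases Nat.mod_two_eq_zero_or_one i with h | h <;>
        simp [String.join, h, Nat.add_mod, String.append_assoc] <;>
        exact ⟨(foldl_append_str _ _).symm, by omega, by omega⟩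

theorem print_tbuf_spec : Claim_equal_print_tbuf := by
  unfold Claim_equal_print_tbuf
  intro tbuf _
  unfold Spec_print_tbuf print_tbuf print_tbuf_alt
  rw [print_tbuf_loop_eq]
  simp [String.join, String.append_assoc]
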